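-- pv_equiv track=rewrite | github.com/pwright/skupper-docs | refdog/scripts/extract_command_metadata.py | parse_examples
-- ===== SOURCE A (Python) =====
-- def parse_examples(examples_text):
--     """
--     Parse examples from text format to structured format.
--
--     Input format:
--       # Comment
--       $ command
--       output line 1
--       output line 2
--
--       # Another comment
--       $ another command
--
--     Output format:
--       [
--         {
--           "description": "Comment",
--           "command": "command",
--           "output": "output line 1\noutput line 2"
--         },
--         ...
--       ]
--     """
--     if not examples_text:
--         return []
--
--     examples = []
--     lines = examples_text.strip().split('\n')
--
--     current_example = None
--     current_output = []
--
--     for line in lines: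
--         stripped = line.strip()
--
--         if stripped.startswith('#'):
--             # Save previous example if exists
--             if current_example:
--                 if current_output:
--                     current_example['output'] = '\n'.join(current_output).strip()
--                 examples.append(current_example)
--
--             # Start new example
--             current_example = {
--                 "description": stripped[1:].strip()
--             }
--             current_output = []
--
--         elif stripped.startswith('$'):
--             # Command line
--             if current_example:
--                 current_example['command'] = stripped[1:].strip()
--
--         elif stripped and current_example and 'command' in current_example:
--             # Output line
--             current_output.append(line.rstrip())
--
--         elif not stripped and current_output:
--             # Empty line in output
--             current_output.append('')
--
--     # Don't forget the last example
--     if current_example: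
--         if current_output:
--             current_example['output'] = '\n'.join(current_output).strip()
--         examples.append(current_example)
--
--     return examples
-- ===== SOURCE B (Python) =====
-- def parse_examples(examples_text):
--     """Parse examples from text format to structured format (block decomposition)."""
--     if not examples_text:
--         return []
--     lines = examples_text.strip().split('\n')
--     # partition into blocks: each block starts at a line whose stripped form begins with '#'
--     blocks = []
--     for line in lines:
--         stripped = line.strip()
--         if stripped.startswith('#'):
--             blocks.append((stripped[1:].strip(), []))
--         elif blocks:
--             blocks[-1][1].append(line)
--     examples = []
--     for description, body in blocks:
--         command = None
--         collected = []
--         for line in body: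
--             stripped = line.strip()
--             if stripped.startswith('$'):
--                 command = stripped[1:].strip()
--             elif stripped:
--                 if command is not None:
--                     collected.append(line.rstrip())
--             elif collected:
--                 collected.append('')
--         example = {"description": description}
--         if command is not None:
--             example["command"] = command
--         if collected:
--             example["output"] = '\n'.join(collected).strip()
--         examples.append(example)
--     return examples
-- ===== Notes on version B (the rewrite author's own statement) =====
-- stated objective: alternative
-- what changed: A's single stateful loop (current example dict mutated in flight and saved at the next header or at EOF) is replaced by a two-phase decomposition: one pass partitions the lines into comment-headed blocks, then each block is processed independently into its dict.
import Mathlib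
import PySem

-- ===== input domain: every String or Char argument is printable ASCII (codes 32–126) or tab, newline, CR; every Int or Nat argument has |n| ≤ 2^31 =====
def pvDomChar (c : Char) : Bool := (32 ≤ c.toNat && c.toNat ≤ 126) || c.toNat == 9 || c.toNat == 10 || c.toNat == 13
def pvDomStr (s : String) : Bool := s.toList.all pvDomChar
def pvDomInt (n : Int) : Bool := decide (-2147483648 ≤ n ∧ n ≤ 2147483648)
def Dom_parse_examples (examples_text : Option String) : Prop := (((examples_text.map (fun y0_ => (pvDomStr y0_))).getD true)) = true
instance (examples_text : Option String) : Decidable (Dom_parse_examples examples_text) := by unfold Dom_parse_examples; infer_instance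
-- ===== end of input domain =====

-- B re-decomposes A's single stateful line loop into two phases: partition the lines into
-- comment-headed blocks, then process each block independently (same return value; objective:
-- alternative decomposition).

-- ===== PORT A =====
-- save the current example (adding 'output' if any output was collected), as A does at '#' lines and at the end
def pvSaveA (E : List (PySem.Dict String String)) (cur : Option (PySem.Dict String String))
    (out : List String) : List (PySem.Dict String String) :=
  match cur with
  | none => E
  | some d =>
      E ++ [if out ≠ [] then d.insert "output" (PySem.Str.strip (PySem.Str.join "\n" out)) else d]

-- one iteration of A's `for line in lines` loop; state = (examples, current_example, current_output)
def pvStepA (st : List (PySem.Dict String String) × Option (PySem.Dict String String) × List String)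
    (line : String) : List (PySem.Dict String String) × Option (PySem.Dict String String) × List String :=
  let stripped := PySem.Str.strip line
  let E := st.1
  let cur := st.2.1
  let out := st.2.2
  if PySem.Str.startswith stripped "#" then
    (pvSaveA E cur out,
     some (PySem.Dict.insert PySem.Dict.empty "description"
            (PySem.Str.strip (PySem.Str.slice stripped (some 1) none))),
     ([] : List String))
  else if PySem.Str.startswith stripped "$" then
    (E, cur.map (fun d => d.insert "command" (PySem.Str.strip (PySem.Str.slice stripped (some 1) none))), out)
  else if stripped ≠ "" then
    match cur with
    | some d => if d.contains "command" then (E, cur, out ++ [PySem.Str.rstrip line]) else (E, cur, out)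
    | none => (E, cur, out)
  else if out ≠ [] then (E, cur, out ++ [""]) else (E, cur, out)

def parse_examples (examples_text : Option String) : List (List (String × String)) :=
  match examples_text with
  | none => []
  | some t =>
      if t = "" then []
      else
        -- split? is always `some` here: the separator "\n" is nonempty
        let lines := (PySem.Str.split? (PySem.Str.strip t) "\n").getD []
        let fin := lines.foldl pvStepA ([], none, [])
        (pvSaveA fin.1 fin.2.1 fin.2.2).map PySem.Dict.items

-- ===== PORT B =====
-- blocks[-1][1].append(line)  (no-op on an empty blocks list, as Source B's `elif blocks:` guard)
def pvAppendLast (acc : List (String × List String)) (line : String) : List (String × List String) :=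
  match acc with
  | [] => []
  | [(d, b)] => [(d, b ++ [line])]
  | x :: xs => x :: pvAppendLast xs line

-- one iteration of Source B's first loop: partition lines into blocks headed by '#' lines
def pvBlockStep (acc : List (String × List String)) (line : String) : List (String × List String) :=
  let stripped := PySem.Str.strip line
  if PySem.Str.startswith stripped "#" then
    acc ++ [(PySem.Str.strip (PySem.Str.slice stripped (some 1) none), ([] : List String))]
  else pvAppendLast acc line

-- one iteration of Source B's inner loop over a block body; state = (command, collected)
def pvBodyStep (st : Option String × List String) (line : String) : Option String × List String :=
  let stripped := PySem.Str.strip line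
  if PySem.Str.startswith stripped "$" then
    (some (PySem.Str.strip (PySem.Str.slice stripped (some 1) none)), st.2)
  else if stripped ≠ "" then
    (st.1, if st.1.isSome then st.2 ++ [PySem.Str.rstrip line] else st.2)
  else
    (st.1, if st.2 ≠ [] then st.2 ++ [""] else st.2)

-- Source B's second loop body: assemble one example dict (as an assoc list) from a block
def pvExample (desc : String) (body : List String) : List (String × String) :=
  let res := body.foldl pvBodyStep (none, [])
  [("description", desc)]
    ++ (match res.1 with | some c => [("command", c)] | none => [])
    ++ (if res.2 ≠ [] then [("output", PySem.Str.strip (PySem.Str.join "\n" res.2))] else [])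

def parse_examples_alt (examples_text : Option String) : List (List (String × String)) :=
  match examples_text with
  | none => []
  | some t =>
      if t = "" then []
      else
        -- split? is always `some` here: the separator "\n" is nonempty
        let lines := (PySem.Str.split? (PySem.Str.strip t) "\n").getD []
        ((lines.foldl pvBlockStep []).map (fun b => pvExample b.1 b.2))

-- ===== PRECONDITION & SPEC =====
def Spec_parse_examples (examples_text : Option String) (out : List (List (String × String))) : Prop := out = parse_examples_alt examples_text
instance (examples_text : Option String) (out : List (List (String × String))) : Decidable (Spec_parse_examples examples_text out) := by unfold Spec_parse_examples; infer_instance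

-- ===== CLAIM (what is proved, stated in full; the proofs are below) =====
def Claim_equal_parse_examples : Prop := ∀ (examples_text : Option String), Dom_parse_examples examples_text → Spec_parse_examples examples_text (parse_examples examples_text)

-- ===== LEMMAS AND PROOFS =====

-- the only dicts A's loop ever keeps in current_example: description, then possibly command
def pvDictOf (desc : String) (cmd : Option String) : PySem.Dict String String :=
  match cmd with
  | none => PySem.Dict.mk [("description", desc)]
  | some c => PySem.Dict.mk [("description", desc), ("command", c)]

-- the dict A saves for a block with header desc and body lines
def pvSavedDict (b : String × List String) : PySem.Dict String String :=
  let res := b.2.foldl pvBodyStep (none, [])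
  if res.2 ≠ [] then (pvDictOf b.1 res.1).insert "output" (PySem.Str.strip (PySem.Str.join "\n" res.2))
  else pvDictOf b.1 res.1

-- A's final answer from a loop state
def pvFinishA (st : List (PySem.Dict String String) × Option (PySem.Dict String String) × List String) :
    List (List (String × String)) :=
  (pvSaveA st.1 st.2.1 st.2.2).map PySem.Dict.items

lemma pvDictOf_empty_insert (d : String) :
    PySem.Dict.insert PySem.Dict.empty "description" d = pvDictOf d none := by
  rfl

lemma pvDictOf_insert_command (d : String) (cmd : Option String) (c : String) :
    (pvDictOf d cmd).insert "command" c = pvDictOf d (some c) := by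
  cases cmd <;> simp [pvDictOf, PySem.Dict.insert]

lemma pvDictOf_contains_command (d : String) (cmd : Option String) :
    (pvDictOf d cmd).contains "command" = cmd.isSome := by
  cases cmd <;> simp [pvDictOf]

lemma pvItems_savedDict (b : String × List String) :
    (pvSavedDict b).items = pvExample b.1 b.2 := by
  obtain ⟨d, body⟩ := b
  simp only [pvSavedDict, pvExample]
  rcases h : body.foldl pvBodyStep (none, []) with ⟨cmd, col⟩
  cases cmd <;> rcases col with _ | ⟨x, xs⟩ <;>
    simp [pvDictOf, PySem.Dict.insert, PySem.Dict.items]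

lemma pvAppendLast_concat (xs : List (String × List String)) (d : String) (b : List String) (l : String) :
    pvAppendLast (xs ++ [(d, b)]) l = xs ++ [(d, b ++ [l])] := by
  induction xs with
  | nil => rfl
  | cons x xs ih =>
      cases xs with
      | nil => rfl
      | cons y ys =>
          simp only [List.cons_append, pvAppendLast]
          rw [List.cons_append] at ih
          rw [ih]
          rfl

lemma pvMain (lines : List String) :
    ∀ (done : List (String × List String)) (desc : String) (body : List String),
    pvFinishA (lines.foldl pvStepA
        (done.map pvSavedDict,
         some (pvDictOf desc (body.foldl pvBodyStep (none, [])).1),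
         (body.foldl pvBodyStep (none, [])).2))
    = ((lines.foldl pvBlockStep (done ++ [(desc, body)])).map (fun b => pvExample b.1 b.2)) := by
  induction lines with
  | nil =>
      intro done desc body
      simp only [List.foldl_nil, pvFinishA, pvSaveA, List.map_append, List.map_cons, List.map_nil,
        List.map_map]
      congr 1
      · exact List.map_congr_left (fun b _ => pvItems_savedDict b)
      · rw [← pvItems_savedDict (desc, body)]
        rfl
  | cons l ls ih =>
      intro done desc body
      simp only [List.foldl_cons]
      by_cases h1 : PySem.Str.startswith (PySem.Str.strip l) "#"
      · have hsave : pvSaveA (done.map pvSavedDict)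
              (some (pvDictOf desc (body.foldl pvBodyStep (none, [])).1))
              (body.foldl pvBodyStep (none, [])).2
            = (done ++ [(desc, body)]).map pvSavedDict := by
          simp only [pvSaveA, List.map_append, List.map_cons, List.map_nil]
          rfl
        have hstep : pvStepA (done.map pvSavedDict,
             some (pvDictOf desc (body.foldl pvBodyStep (none, [])).1),
             (body.foldl pvBodyStep (none, [])).2) l
            = ((done ++ [(desc, body)]).map pvSavedDict,
               some (pvDictOf (PySem.Str.strip (PySem.Str.slice (PySem.Str.strip l) (some 1) none))
                      ((([] : List String).foldl pvBodyStep (none, [])).1)),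
               (([] : List String).foldl pvBodyStep (none, [])).2) := by
          simp only [pvStepA, h1, if_pos, hsave, pvDictOf_empty_insert, List.foldl_nil]
        have hblock : pvBlockStep (done ++ [(desc, body)]) l
            = (done ++ [(desc, body)])
              ++ [((PySem.Str.strip (PySem.Str.slice (PySem.Str.strip l) (some 1) none)), ([] : List String))] := by
          simp only [pvBlockStep, h1, if_pos]
        rw [hstep, hblock]
        exact ih (done ++ [(desc, body)]) _ []
      · have hblock : pvBlockStep (done ++ [(desc, body)]) l = done ++ [(desc, body ++ [l])] := by
          simp only [pvBlockStep, h1, if_neg, if_false]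
          exact pvAppendLast_concat done desc body l
        have hb : (body ++ [l]).foldl pvBodyStep (none, [])
            = pvBodyStep (body.foldl pvBodyStep (none, [])) l := by
          simp [List.foldl_append]
        have key := ih done desc (body ++ [l])
        rw [hblock]
        rw [hb] at key
        rcases hfb : body.foldl pvBodyStep (none, []) with ⟨cmd, col⟩
        rw [hfb] at key
        by_cases h2 : PySem.Str.startswith (PySem.Str.strip l) "$"
        · have hstep : pvStepA (done.map pvSavedDict, some (pvDictOf desc cmd), col) l
              = (done.map pvSavedDict,
                 some (pvDictOf desc (some (PySem.Str.strip (PySem.Str.slice (PySem.Str.strip l) (some 1) none)))),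
                 col) := by
            simp only [pvStepA, h1, h2, Bool.false_eq_true, eq_self_iff_true, if_true, if_false,
              Option.map_some, pvDictOf_insert_command]
          have hbs : pvBodyStep (cmd, col) l
              = (some (PySem.Str.strip (PySem.Str.slice (PySem.Str.strip l) (some 1) none)), col) := by
            simp only [pvBodyStep, h2, if_pos]
          rw [hbs] at key
          rw [hstep]
          exact key
        · by_cases h3 : PySem.Str.strip l = ""
          · have hstep : pvStepA (done.map pvSavedDict, some (pvDictOf desc cmd), col) l
                = (done.map pvSavedDict, some (pvDictOf desc cmd),
                   if col ≠ [] then col ++ [""] else col) := by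
              simp only [pvStepA, h1, h2, h3, Bool.false_eq_true, eq_self_iff_true, if_true, if_false,
                ne_eq, not_true_eq_false, (show PySem.Str.startswith "" "$" = false from rfl),
                (show PySem.Str.startswith "" "#" = false from rfl)]
              split <;> rfl
            have hbs : pvBodyStep (cmd, col) l = (cmd, if col ≠ [] then col ++ [""] else col) := by
              simp only [pvBodyStep, h2, h3, Bool.false_eq_true, eq_self_iff_true, if_true, if_false,
                ne_eq, not_true_eq_false, (show PySem.Str.startswith "" "$" = false from rfl)]
            rw [hbs] at key
            rw [hstep]
            exact key
          · have hstep : pvStepA (done.map pvSavedDict, some (pvDictOf desc cmd), col) l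
                = (done.map pvSavedDict, some (pvDictOf desc cmd),
                   if cmd.isSome then col ++ [PySem.Str.rstrip l] else col) := by
              cases cmd with
              | none =>
                  simp only [pvStepA, h1, h2, h3, Bool.false_eq_true, eq_self_iff_true, if_true,
                    if_false, ne_eq, not_false_iff, pvDictOf_contains_command, Option.isSome_none]
              | some c =>
                  simp only [pvStepA, h1, h2, h3, Bool.false_eq_true, eq_self_iff_true, if_true,
                    if_false, ne_eq, not_false_iff, pvDictOf_contains_command, Option.isSome_some]
            have hbs : pvBodyStep (cmd, col) l
                = (cmd, if cmd.isSome then col ++ [PySem.Str.rstrip l] else col) := by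
              simp only [pvBodyStep, h2, h3, Bool.false_eq_true, eq_self_iff_true, if_true, if_false,
                ne_eq, not_false_iff]
            rw [hbs] at key
            rw [hstep]
            exact key

lemma pvPre (lines : List String) :
    pvFinishA (lines.foldl pvStepA ([], none, []))
    = ((lines.foldl pvBlockStep []).map (fun b => pvExample b.1 b.2)) := by
  induction lines with
  | nil => rfl
  | cons l ls ih =>
      simp only [List.foldl_cons]
      by_cases h1 : PySem.Str.startswith (PySem.Str.strip l) "#"
      · have hstep : pvStepA ([], none, ([] : List String)) l
            = (([] : List (String × List String)).map pvSavedDict,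
               some (pvDictOf (PySem.Str.strip (PySem.Str.slice (PySem.Str.strip l) (some 1) none))
                      ((([] : List String).foldl pvBodyStep (none, [])).1)),
               (([] : List String).foldl pvBodyStep (none, [])).2) := by
          simp only [pvStepA, h1, if_pos, pvSaveA, pvDictOf_empty_insert, List.foldl_nil,
            List.map_nil]
        have hblock : pvBlockStep [] l
            = [] ++ [((PySem.Str.strip (PySem.Str.slice (PySem.Str.strip l) (some 1) none)), ([] : List String))] := by
          simp only [pvBlockStep, h1, if_pos, List.nil_append]
        rw [hstep, hblock]
        exact pvMain ls [] _ []
      · have hstep : pvStepA ([], none, ([] : List String)) l = ([], none, []) := by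
          simp only [pvStepA, h1, Bool.false_eq_true, if_false, Option.map_none]
          split
          · rfl
          · split <;> rfl
        have hblock : pvBlockStep [] l = [] := by
          simp only [pvBlockStep, h1, Bool.false_eq_true, if_false]
          rfl
        rw [hstep, hblock]
        exact ih

-- ===== VERDICT (by name: the statement is the Claim_ definition above) =====
theorem parse_examples_spec : Claim_equal_parse_examples := by
  intro examples_text _
  unfold Spec_parse_examples
  cases examples_text with
  | none => rfl
  | some t =>
      by_cases h : t = ""
      · subst h; rfl
      · simp only [parse_examples, parse_examples_alt, h, if_false]
        exact pvPre ((PySem.Str.split? (PySem.Str.strip t) "\n").getD [])
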